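-- pv_equiv track=rewrite | github.com/francescacollu/bills-classification | analysis/ClusteringTitoli_NMF.py | mytokenizer
-- ===== SOURCE A (Python) =====
-- import string
--
-- def mytokenizer(atto):
--     tokenlist = atto.split()
--     tokenlist = [token for token in tokenlist if token != """ ' """ and len(token) > 3] # escludo gli apostrofi, spesso non riconosciuti tra i caratteri di punteggiatura
--     new_atto = []
--     for t in tokenlist:
--         if t[0:4] != "http":
--             new_atto.append(t)
--     new_atto = " ".join(new_atto)
--     clean_atto = new_atto.translate(str.maketrans(string.punctuation, ' '*len(string.punctuation)))
--     tokens = clean_atto.split(" ")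
--     new_tokens = []
--     for token in tokens:
--         if(token.isalnum() and token.isnumeric()==False):
--             new_tokens.append(token)
--     return new_tokens
-- ===== SOURCE B (Python) =====
-- import string
--
-- _PUNCT = set(string.punctuation)
--
-- def mytokenizer(atto):
--     # single pass: filter each whitespace token, then split it at punctuation
--     out = []
--     for token in atto.split():
--         if len(token) <= 3 or token[0:4] == "http":
--             continue
--         sub = []
--         piece = []
--         for ch in token:
--             if ch in _PUNCT:
--                 sub.append(''.join(piece))
--                 piece = []
--             else:
--                 piece.append(ch)
--         sub.append(''.join(piece))
--         for t in sub:
--             if t.isalnum() and not t.isnumeric():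
--                 out.append(t)
--     return out
-- ===== Notes on version B (the rewrite author's own statement) =====
-- stated objective: alternative
-- what changed: B makes a single pass over the whitespace tokens, splitting each surviving token at punctuation characters with one character-level loop, instead of A's four sequential passes that filter, re-join into one big string, translate it and re-split it.
import Mathlib
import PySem

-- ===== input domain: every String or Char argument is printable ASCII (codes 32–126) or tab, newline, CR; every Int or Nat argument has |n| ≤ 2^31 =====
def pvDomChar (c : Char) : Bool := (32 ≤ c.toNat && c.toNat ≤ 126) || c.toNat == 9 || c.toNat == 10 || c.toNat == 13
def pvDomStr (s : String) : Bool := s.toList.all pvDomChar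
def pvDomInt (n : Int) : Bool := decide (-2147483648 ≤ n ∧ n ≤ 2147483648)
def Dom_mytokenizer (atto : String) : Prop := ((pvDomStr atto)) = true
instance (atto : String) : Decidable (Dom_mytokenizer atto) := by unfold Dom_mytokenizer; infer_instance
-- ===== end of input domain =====

-- B fuses A's four sequential passes (filter, join, translate, re-split) into one pass
-- over the whitespace tokens that splits each surviving token at punctuation directly.


-- string.punctuation (shared module constant of both implementations)
def pyPunct : List Char := "!\"#$%&'()*+,-./:;<=>?@[\\]^_`{|}~".toList

-- ===== PORT A =====
-- new_atto.translate(str.maketrans(string.punctuation, ' '*len(string.punctuation))):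
-- a per-code-point map replacing each punctuation character by a space (exact).
def pyTranslatePunct (cs : List Char) : List Char :=
  cs.map (fun c => if c ∈ pyPunct then ' ' else c)

-- token.isnumeric() is ported as PySem.Str.strIsdigit: exact on the ASCII domain Dom,
-- where str.isnumeric and str.isdigit coincide.
def mytokenizer (atto : String) : List String :=
  let tokenlist := PySem.Str.split₀ atto
  let tokenlist := tokenlist.filter
    (fun token => token != " ' " && decide ((3 : Int) < PySem.Str.len token))
  let new_atto := tokenlist.foldl
    (fun acc t => if PySem.Str.slice t none (some 4) != "http" then acc ++ [t] else acc) []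
  let new_atto' := PySem.Str.join " " new_atto
  let clean_atto := String.ofList (pyTranslatePunct new_atto'.toList)
  let tokens := (PySem.Str.split? clean_atto " ").getD []   -- sep " " is non-empty: never none
  tokens.foldl
    (fun acc token =>
      if PySem.Str.strIsalnum token && !PySem.Str.strIsdigit token then acc ++ [token] else acc) []

-- ===== PORT B =====
-- the inner character loop of Source B: accumulate (sub, piece), cutting at punctuation
def bSplitStep (st : List (List Char) × List Char) (ch : Char) : List (List Char) × List Char :=
  if ch ∈ pyPunct then (st.1 ++ [st.2], []) else (st.1, st.2 ++ [ch])

def bSplit (cs : List Char) : List (List Char) :=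
  let st := cs.foldl bSplitStep ([], [])
  st.1 ++ [st.2]

-- t.isnumeric() ported as strIsdigit, exact on the ASCII domain Dom (as in port A)
def mytokenizer_alt (atto : String) : List String :=
  (PySem.Str.split₀ atto).foldl
    (fun out token =>
      if decide (PySem.Str.len token ≤ (3 : Int)) || PySem.Str.slice token none (some 4) == "http" then
        out
      else
        (bSplit token.toList).foldl
          (fun o t =>
            if PySem.Chars.strIsalnum t && !PySem.Chars.strIsdigit t then o ++ [String.ofList t] else o)
          out)
    []

-- ===== PRECONDITION & SPEC =====
def Spec_mytokenizer (atto : String) (out : List String) : Prop := out = mytokenizer_alt atto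
instance (atto : String) (out : List String) : Decidable (Spec_mytokenizer atto out) := by unfold Spec_mytokenizer; infer_instance

-- ===== CLAIM (what is proved, stated in full; the proofs are below) =====
def Claim_equal_mytokenizer : Prop := ∀ (atto : String), Dom_mytokenizer atto → Spec_mytokenizer atto (mytokenizer atto)

-- ===== LEMMAS AND PROOFS =====

def isP (c : Char) : Bool := decide (c ∈ pyPunct)
def keepC (t : List Char) : Bool := PySem.Chars.strIsalnum t && !PySem.Chars.strIsdigit t
def skipB (token : String) : Bool :=
  decide (PySem.Str.len token ≤ (3 : Int)) || PySem.Str.slice token none (some 4) == "http"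
def usOf (atto : String) : List String := (PySem.Str.split₀ atto).filter (fun t => !skipB t)
def gB (token : String) : List String := ((bSplit token.toList).filter keepC).map String.ofList

-- the three append-loops of the two ports, as filters (stated on the ports' own lambdas)
theorem foldlA_http (l acc : List String) : l.foldl
    (fun acc t => if PySem.Str.slice t none (some 4) != "http" then acc ++ [t] else acc) acc =
    acc ++ l.filter (fun t => PySem.Str.slice t none (some 4) != "http") := by
  simpa using PySem.List.foldl_append_if
    (fun t => PySem.Str.slice t none (some 4) != "http") id l acc

theorem foldlA_keep (l acc : List String) : l.foldl
    (fun acc token =>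
      if PySem.Str.strIsalnum token && !PySem.Str.strIsdigit token then acc ++ [token] else acc) acc =
    acc ++ l.filter (fun token => PySem.Str.strIsalnum token && !PySem.Str.strIsdigit token) := by
  simpa using PySem.List.foldl_append_if
    (fun token => PySem.Str.strIsalnum token && !PySem.Str.strIsdigit token) id l acc

theorem foldlB_inner (cs : List (List Char)) (out : List String) : cs.foldl
    (fun o t =>
      if PySem.Chars.strIsalnum t && !PySem.Chars.strIsdigit t then o ++ [String.ofList t] else o) out =
    out ++ (cs.filter keepC).map String.ofList := by
  simpa only [keepC] using PySem.List.foldl_append_if keepC String.ofList cs out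


theorem toList_injective : Function.Injective String.toList := by
  intro a b h
  have := congrArg String.ofList h
  simpa using this


theorem splitOn_go_single (c : Char) (l : List Char) :
    ∀ (fuel : Nat) (cur : List Char) (acc : List (List Char)), l.length < fuel →
      PySem.Chars.splitOn.go [c] fuel l cur acc =
        acc.reverse ++ List.modifyHead (cur.reverse ++ ·) (List.splitOnP (· == c) l) := by
  induction l with
  | nil =>
    intro fuel cur acc h
    match fuel with
    | fuel + 1 => simp [PySem.Chars.splitOn.go, List.splitOnP_nil]
  | cons ch rest ih =>
    intro fuel cur acc h
    match fuel with
    | fuel + 1 =>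
      rw [PySem.Chars.splitOn.go]
      simp only [List.isPrefixOf, Bool.and_true, List.splitOnP_cons]
      by_cases hc : (c == ch) = true
      · have hch : (ch == c) = true := by
          rw [beq_iff_eq] at hc ⊢; exact hc.symm
        rw [if_pos hc, hch]
        simp only [List.length_cons, List.drop_succ_cons, List.length_nil, List.drop_zero]
        rw [ih fuel [] (cur.reverse :: acc) (by simpa using h)]
        simp only [List.reverse_cons, List.reverse_nil, List.nil_append,
          List.append_assoc, List.singleton_append]
        cases hsp : List.splitOnP (· == c) rest with
        | nil => exact absurd hsp (List.splitOnP_ne_nil _ _)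
        | cons x xs => simp [List.modifyHead]
      · have hch : (ch == c) = false := by
          simp only [beq_eq_false_iff_ne, ne_eq]
          intro e; exact hc (by simp [e])
        rw [if_neg hc, hch]
        rw [ih fuel (ch :: cur) acc (by simpa using h)]
        simp [List.modifyHead_modifyHead, Function.comp_def]

theorem splitOn_single (c : Char) (l : List Char) :
    PySem.Chars.splitOn l [c] = List.splitOnP (· == c) l := by
  rw [PySem.Chars.splitOn, splitOn_go_single c l (l.length + 1) [] [] (by omega)]
  cases hsp : List.splitOnP (· == c) l with
  | nil => exact absurd hsp (List.splitOnP_ne_nil _ _)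
  | cons x xs => simp [List.modifyHead]

theorem translate_join (css : List (List Char)) :
    pyTranslatePunct (PySem.Chars.join [' '] css) =
      PySem.Chars.join [' '] (css.map pyTranslatePunct) := by
  induction css with
  | nil => simp [PySem.Chars.join, pyTranslatePunct, List.intercalate]
  | cons x xs ih =>
    cases xs with
    | nil => simp [PySem.Chars.join, pyTranslatePunct, List.intercalate]
    | cons y ys =>
      rw [List.map_cons, List.map_cons, PySem.Chars.join_cons_cons, PySem.Chars.join_cons_cons]
      simp only [pyTranslatePunct] at ih ⊢
      simp only [List.map_append, ih]
      norm_num [pyTranslatePunct]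

theorem splitOnP_join (css : List (List Char)) (h : css ≠ []) :
    List.splitOnP (· == ' ') (PySem.Chars.join [' '] css) =
      css.flatMap (List.splitOnP (· == ' ')) := by
  induction css with
  | nil => exact absurd rfl h
  | cons x xs ih =>
    cases xs with
    | nil => simp [PySem.Chars.join, List.intercalate]
    | cons y ys =>
      rw [PySem.Chars.join_cons_cons, List.flatMap_cons]
      have : x ++ [' '] ++ PySem.Chars.join [' '] (y :: ys) =
          x ++ ' ' :: PySem.Chars.join [' '] (y :: ys) := by simp
      rw [this, List.splitOnP_append_cons _ _ _ _ (by decide), ih (by simp)]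

theorem splitOnP_translate (t : List Char) (h : ' ' ∉ t) :
    List.splitOnP (· == ' ') (pyTranslatePunct t) = List.splitOnP isP t := by
  induction t with
  | nil => simp [pyTranslatePunct]
  | cons ch rest ih =>
    have hch : ch ≠ ' ' := fun e => h (by simp [e])
    have ih' := ih (fun e => h (List.mem_cons_of_mem _ e))
    simp only [pyTranslatePunct] at ih' ⊢
    simp only [List.map_cons, List.splitOnP_cons]
    by_cases hp : ch ∈ pyPunct
    · have h2 : isP ch = true := by simp [isP, hp]
      simp [if_pos hp, h2, ih']
    · have h1 : (ch == ' ') = false := by simp [hch]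
      have h2 : isP ch = false := by simp [isP, hp]
      simp [if_neg hp, h1, h2, ih']

theorem bSplit_go (t : List Char) :
    ∀ (sub : List (List Char)) (piece : List Char),
      (t.foldl bSplitStep (sub, piece)).1 ++ [(t.foldl bSplitStep (sub, piece)).2] =
        sub ++ List.modifyHead (piece ++ ·) (List.splitOnP isP t) := by
  induction t with
  | nil =>
    intro sub piece
    simp [List.splitOnP_nil, List.modifyHead]
  | cons ch rest ih =>
    intro sub piece
    simp only [List.foldl_cons, List.splitOnP_cons]
    by_cases hp : ch ∈ pyPunct
    · rw [show bSplitStep (sub, piece) ch = (sub ++ [piece], []) from by simp [bSplitStep, hp]]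
      rw [ih (sub ++ [piece]) []]
      have h2 : isP ch = true := by simp [isP, hp]
      rw [h2]
      simp only [List.append_assoc, List.singleton_append]
      cases hsp : List.splitOnP isP rest with
      | nil => exact absurd hsp (List.splitOnP_ne_nil _ _)
      | cons x xs => simp [List.modifyHead]
    · rw [show bSplitStep (sub, piece) ch = (sub, piece ++ [ch]) from by simp [bSplitStep, hp]]
      rw [ih sub (piece ++ [ch])]
      have h2 : isP ch = false := by simp [isP, hp]
      rw [h2]
      simp [List.modifyHead_modifyHead, Function.comp_def]

theorem bSplit_eq (t : List Char) : bSplit t = List.splitOnP isP t := by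
  rw [bSplit]
  have := bSplit_go t [] []
  simp only [List.nil_append] at this
  rw [this]
  cases hsp : List.splitOnP isP t with
  | nil => exact absurd hsp (List.splitOnP_ne_nil _ _)
  | cons x xs => simp [List.modifyHead]

theorem split₀_go_no_space :
    ∀ (l cur : List Char) (acc : List (List Char)),
      (∀ ch ∈ cur, PySem.Chars.isspace ch = false) →
      (∀ p ∈ acc, ∀ ch ∈ p, PySem.Chars.isspace ch = false) →
      ∀ p ∈ PySem.Chars.split₀.go l cur acc, ∀ ch ∈ p, PySem.Chars.isspace ch = false := by
  intro l
  induction l with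
  | nil =>
    intro cur acc hcur hacc p hp
    rw [PySem.Chars.split₀.go] at hp
    by_cases he : cur.isEmpty
    · rw [if_pos he] at hp
      simp only [List.mem_reverse] at hp
      exact hacc p hp
    · rw [if_neg he] at hp
      simp only [List.mem_reverse, List.mem_cons] at hp
      rcases hp with h | h
      · subst h; intro ch hch; exact hcur ch (by simpa using hch)
      · exact hacc p h
  | cons c rest ih =>
    intro cur acc hcur hacc p hp
    rw [PySem.Chars.split₀.go] at hp
    by_cases hs : PySem.Chars.isspace c
    · rw [if_pos hs] at hp
      by_cases he : cur.isEmpty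
      · rw [if_pos he] at hp
        exact ih [] acc (by simp) hacc p hp
      · rw [if_neg he] at hp
        refine ih [] (cur.reverse :: acc) (by simp) ?_ p hp
        intro q hq
        rcases List.mem_cons.1 hq with h | h
        · subst h; intro ch hch; exact hcur ch (by simpa using hch)
        · exact hacc q h
    · rw [if_neg hs] at hp
      refine ih (c :: cur) acc ?_ hacc p hp
      intro ch hch
      rcases List.mem_cons.1 hch with h | h
      · subst h; simpa using hs
      · exact hcur ch h

theorem split₀_no_space (s : List Char) :
    ∀ p ∈ PySem.Chars.split₀ s, ' ' ∉ p := by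
  intro p hp hmem
  have := split₀_go_no_space s [] [] (by simp) (by simp) p hp ' ' hmem
  simp [PySem.Chars.isspace] at this

-- A's two successive filters equal B's single skip test
theorem filters_eq_skip (t : String) :
    ((PySem.Str.slice t none (some 4) != "http") &&
      (t != " ' " && decide ((3 : Int) < PySem.Str.len t))) = !skipB t := by
  unfold skipB
  by_cases he : t = " ' "
  · subst he; decide
  · have h1 : (t != " ' ") = true := by simp [bne, he]
    rw [h1]
    have h2 : decide ((3 : Int) < PySem.Str.len t) = !decide (PySem.Str.len t ≤ (3 : Int)) := by
      by_cases h : (3 : Int) < PySem.Str.len t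
      · rw [decide_eq_true h, decide_eq_false (not_le.mpr h)]; rfl
      · rw [decide_eq_false h, decide_eq_true (not_lt.mp h)]; rfl
    rw [h2]
    cases hsl : (PySem.Str.slice t none (some 4) == "http") <;>
      cases hle : decide (PySem.Str.len t ≤ (3 : Int)) <;> simp_all [bne]

theorem foldl_skip_flatMap (g : String → List String) (ts : List String) (out : List String) :
    ts.foldl (fun out token => if skipB token then out else out ++ g token) out =
      out ++ (ts.filter (fun t => !skipB t)).flatMap g := by
  induction ts generalizing out with
  | nil => simp
  | cons t ts ih =>
    simp only [List.foldl_cons, List.filter_cons]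
    cases h : skipB t with
    | true => simp [ih]
    | false => simp [ih]

theorem filter_flatMap_comm {α β : Type} (p : β → Bool) (f : α → List β) (l : List α) :
    (l.flatMap f).filter p = l.flatMap (fun x => (f x).filter p) := by
  induction l with
  | nil => simp
  | cons x xs ih => simp [List.flatMap_cons, List.filter_append, ih]

-- B collapses to a flatMap over the kept whitespace tokens
theorem B_eq (atto : String) : mytokenizer_alt atto = (usOf atto).flatMap gB := by
  unfold mytokenizer_alt
  have hstep : (fun (out : List String) (token : String) =>
      if decide (PySem.Str.len token ≤ (3 : Int)) || PySem.Str.slice token none (some 4) == "http" then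
        out
      else
        (bSplit token.toList).foldl
          (fun o t =>
            if PySem.Chars.strIsalnum t && !PySem.Chars.strIsdigit t then o ++ [String.ofList t] else o)
          out) =
      (fun out token => if skipB token then out else out ++ gB token) := by
    funext out token
    rw [foldlB_inner (bSplit token.toList) out]
    rfl
  rw [hstep, foldl_skip_flatMap gB (PySem.Str.split₀ atto) []]
  rfl

-- A collapses to filter/split/translate over the same kept tokens, on the character level
theorem A_eq (atto : String) :
    List.map String.toList (mytokenizer atto) =
      List.filter keepC (List.splitOnP (· == ' ')
        (pyTranslatePunct (PySem.Chars.join [' '] ((usOf atto).map String.toList)))) := by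
  unfold mytokenizer
  have hnew : (((PySem.Str.split₀ atto).filter
        (fun token => token != " ' " && decide ((3 : Int) < PySem.Str.len token))).foldl
      (fun acc t => if PySem.Str.slice t none (some 4) != "http" then acc ++ [t] else acc) []) =
      usOf atto := by
    rw [foldlA_http, List.nil_append, List.filter_filter]
    exact List.filter_congr (fun t _ => filters_eq_skip t)
  simp only [hnew]
  -- the split of the cleaned string
  set clean := String.ofList (pyTranslatePunct (PySem.Str.join " " (usOf atto)).toList) with hclean
  obtain ⟨l, hl⟩ : ∃ l, PySem.Str.split? clean " " = some l := by
    cases h : PySem.Str.split? clean " " with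
    | some l => exact ⟨l, rfl⟩
    | none =>
      have := PySem.Str.split?_map clean " "
      rw [h] at this
      simp [PySem.Chars.split?] at this
  have htok : List.map String.toList l =
      List.splitOnP (· == ' ') (pyTranslatePunct (PySem.Str.join " " (usOf atto)).toList) := by
    have := PySem.Str.split?_map clean " "
    rw [hl] at this
    simp only [Option.map_some, PySem.Chars.split?] at this
    have h2 : (" " : String).toList = [' '] := by decide
    rw [h2] at this
    simp only [List.isEmpty_cons, Bool.false_eq_true, if_false] at this
    have h3 : clean.toList = pyTranslatePunct (PySem.Str.join " " (usOf atto)).toList := by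
      rw [hclean]; simp
    rw [h3] at this
    rw [Option.some_inj.1 this, splitOn_single]
  rw [hl]
  simp only [Option.getD_some]
  rw [foldlA_keep l [], List.nil_append]
  have hks : (fun token => PySem.Str.strIsalnum token && !PySem.Str.strIsdigit token) =
      (fun token : String => keepC token.toList) := by
    funext t
    simp [keepC, PySem.Str.strIsalnum_eq, PySem.Str.strIsdigit_eq]
  rw [hks]
  have hfm : List.filter keepC (List.map String.toList l) =
      List.map String.toList (List.filter (fun t : String => keepC t.toList) l) := by
    simpa [Function.comp_def] using List.filter_map (f := String.toList) (p := keepC) (l := l)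
  have h2 : (" " : String).toList = [' '] := by decide
  have hj : (PySem.Str.join " " (usOf atto)).toList =
      PySem.Chars.join [' '] ((usOf atto).map String.toList) := by
    rw [PySem.Str.toList_join, h2]
  rw [← hfm, htok, hj]

-- every kept token is a piece of the whitespace split, hence space-free
theorem usOf_no_space (atto : String) (t : String) (ht : t ∈ usOf atto) : ' ' ∉ t.toList := by
  have h1 : t ∈ PySem.Str.split₀ atto := List.mem_of_mem_filter ht
  have h2 : t.toList ∈ PySem.Chars.split₀ atto.toList := by
    rw [← PySem.Str.split₀_map_toList]
    exact List.mem_map_of_mem h1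
  exact split₀_no_space atto.toList t.toList h2

-- ===== VERDICT (by name: the statement is the Claim_ definition above) =====
theorem mytokenizer_spec : Claim_equal_mytokenizer := by
  intro atto _
  unfold Spec_mytokenizer
  apply List.map_injective_iff.mpr toList_injective
  rw [A_eq, B_eq]
  by_cases hus : usOf atto = []
  · rw [hus]
    simp [PySem.Chars.join, List.intercalate, pyTranslatePunct, List.splitOnP_nil]
    decide
  · rw [translate_join,
      splitOnP_join _ (by simp [hus]),
      filter_flatMap_comm, List.flatMap_map, List.flatMap_map, List.map_flatMap]
    refine List.flatMap_congr (fun token htm => ?_)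
    rw [splitOnP_translate token.toList (usOf_no_space atto token htm), ← bSplit_eq]
    simp [gB, List.map_map, Function.comp_def]
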